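-- pv_equiv track=rewrite | github.com/imstuee76/8bbSmartController | flasher-web/app/integrations.py | _tuya_cloud_indexes
-- ===== SOURCE A (Python) =====
-- from typing import Any
--
-- def _tuya_cloud_indexes(cloud_devices: list[dict[str, Any]]) -> tuple[dict[str, dict[str, Any]], dict[str, dict[str, Any]], dict[str, dict[str, Any]]]:
--     by_id: dict[str, dict[str, Any]] = {}
--     by_mac: dict[str, dict[str, Any]] = {}
--     by_ip: dict[str, dict[str, Any]] = {}
--     for item in cloud_devices:
--         dev_id = str(item.get("id", "")).strip()
--         mac = str(item.get("mac", "")).strip().lower()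
--         ip = str(item.get("ip", "")).strip()
--         if dev_id and dev_id not in by_id:
--             by_id[dev_id] = item
--         if mac and mac not in by_mac:
--             by_mac[mac] = item
--         if ip and ip not in by_ip:
--             by_ip[ip] = item
--     return by_id, by_mac, by_ip
-- ===== SOURCE B (Python) =====
-- def _tuya_cloud_indexes(cloud_devices):
--     def first_index(key_of):
--         index = {}
--         for item in cloud_devices:
--             key = key_of(item)
--             if key:
--                 index.setdefault(key, item)
--         return index
--
--     by_id = first_index(lambda d: str(d.get("id", "")).strip())
--     by_mac = first_index(lambda d: str(d.get("mac", "")).strip().lower())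
--     by_ip = first_index(lambda d: str(d.get("ip", "")).strip())
--     return by_id, by_mac, by_ip
-- ===== Notes on version B (the rewrite author's own statement) =====
-- stated objective: idiomatic
-- what changed: Factors the work into a reusable first_index helper applied once per key function (three passes instead of one fused three-dict loop) and replaces the explicit 'not in' membership guard with dict.setdefault.
import Mathlib
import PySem

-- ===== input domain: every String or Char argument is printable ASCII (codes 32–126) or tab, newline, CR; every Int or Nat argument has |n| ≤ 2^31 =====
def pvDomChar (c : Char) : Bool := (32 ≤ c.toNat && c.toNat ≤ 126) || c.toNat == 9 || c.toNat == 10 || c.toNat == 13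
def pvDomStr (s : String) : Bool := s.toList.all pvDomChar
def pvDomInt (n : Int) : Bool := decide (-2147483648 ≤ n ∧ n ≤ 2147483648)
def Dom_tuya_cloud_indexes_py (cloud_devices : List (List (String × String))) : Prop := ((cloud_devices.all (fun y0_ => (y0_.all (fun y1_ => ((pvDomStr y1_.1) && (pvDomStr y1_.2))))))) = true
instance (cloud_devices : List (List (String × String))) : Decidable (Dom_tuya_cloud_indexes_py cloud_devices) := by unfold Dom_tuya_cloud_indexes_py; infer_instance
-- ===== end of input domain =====

-- B factors the work into a reusable first_index helper applied once per key function (three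
-- passes instead of one fused three-dict loop), with dict.setdefault instead of a membership guard.


-- ===== PORT A =====
-- A's loop body for one of the dicts: 'if key and key not in d: d[key] = item'
def aStep (f : List (String × String) → String)
    (d : PySem.Dict String (List (String × String))) (item : List (String × String)) :
    PySem.Dict String (List (String × String)) :=
  let k := f item
  if k ≠ "" ∧ d.contains k = false then d.insert k item else d

-- the three normalizations computed inside A's loop
def normId (item : List (String × String)) : String :=
  PySem.Str.strip (PySem.Dict.getD (PySem.Dict.mk item) "id" "")
def normMac (item : List (String × String)) : String :=
  PySem.Str.lower (PySem.Str.strip (PySem.Dict.getD (PySem.Dict.mk item) "mac" ""))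
def normIp (item : List (String × String)) : String :=
  PySem.Str.strip (PySem.Dict.getD (PySem.Dict.mk item) "ip" "")

def tuya_cloud_indexes_py (cloud_devices : List (List (String × String))) : (List (String × List (String × String))) × (List (String × List (String × String))) × (List (String × List (String × String))) :=
  let r := cloud_devices.foldl
    (fun s item => (aStep normId s.1 item, aStep normMac s.2.1 item, aStep normIp s.2.2 item))
    (PySem.Dict.empty, PySem.Dict.empty, PySem.Dict.empty)
  (r.1.items, r.2.1.items, r.2.2.items)

-- ===== PORT B =====
-- first_index(key_of): one pass, 'if key: index.setdefault(key, item)'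
def firstIndex (cloud_devices : List (List (String × String)))
    (keyOf : List (String × String) → String) : PySem.Dict String (List (String × String)) :=
  cloud_devices.foldl
    (fun index item =>
      let key := keyOf item
      if key = "" then index else index.setdefault key item)
    PySem.Dict.empty

def tuya_cloud_indexes_py_alt (cloud_devices : List (List (String × String))) : (List (String × List (String × String))) × (List (String × List (String × String))) × (List (String × List (String × String))) :=
  let by_id := firstIndex cloud_devices
    (fun d => PySem.Str.strip (PySem.Dict.getD (PySem.Dict.mk d) "id" ""))
  let by_mac := firstIndex cloud_devices
    (fun d => PySem.Str.lower (PySem.Str.strip (PySem.Dict.getD (PySem.Dict.mk d) "mac" "")))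
  let by_ip := firstIndex cloud_devices
    (fun d => PySem.Str.strip (PySem.Dict.getD (PySem.Dict.mk d) "ip" ""))
  (by_id.items, by_mac.items, by_ip.items)

-- ===== PRECONDITION & SPEC =====
def Spec_tuya_cloud_indexes_py (cloud_devices : List (List (String × String))) (out : (List (String × List (String × String))) × (List (String × List (String × String))) × (List (String × List (String × String)))) : Prop := out = tuya_cloud_indexes_py_alt cloud_devices
instance (cloud_devices : List (List (String × String))) (out : (List (String × List (String × String))) × (List (String × List (String × String))) × (List (String × List (String × String)))) : Decidable (Spec_tuya_cloud_indexes_py cloud_devices out) := by unfold Spec_tuya_cloud_indexes_py; infer_instance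

-- ===== CLAIM (what is proved, stated in full; the proofs are below) =====
def Claim_equal_tuya_cloud_indexes_py : Prop := ∀ (cloud_devices : List (List (String × String))), Dom_tuya_cloud_indexes_py cloud_devices → Spec_tuya_cloud_indexes_py cloud_devices (tuya_cloud_indexes_py cloud_devices)

-- ===== LEMMAS AND PROOFS =====

-- A's guarded insert and B's filtered setdefault are the same step function
theorem aStep_eq_bStep (f : List (String × String) → String)
    (d : PySem.Dict String (List (String × String))) (item : List (String × String)) :
    aStep f d item
      = (let key := f item; if key = "" then d else d.setdefault key item) := by
  by_cases hk : f item = ""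
  · simp [aStep, hk]
  · cases hc : d.contains (f item) with
    | true => simp [aStep, hk, hc, PySem.Dict.setdefault_of_contains (h := hc)]
    | false => simp [aStep, hk, hc, PySem.Dict.setdefault_of_not_contains (h := hc)]

-- hence A's per-field fold is B's firstIndex
theorem aFold_eq_firstIndex (f : List (String × String) → String)
    (devices : List (List (String × String))) :
    devices.foldl (aStep f) PySem.Dict.empty = firstIndex devices f := by
  unfold firstIndex
  congr 1
  funext d item
  exact aStep_eq_bStep f d item

-- ===== VERDICT (by name: the statement is the Claim_ definition above) =====
theorem tuya_cloud_indexes_py_spec : Claim_equal_tuya_cloud_indexes_py := by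
  intro devices _
  unfold Spec_tuya_cloud_indexes_py tuya_cloud_indexes_py tuya_cloud_indexes_py_alt
  rw [PySem.List.foldl_prod_mk (f := fun d item => aStep normId d item)
      (g := fun s item => (aStep normMac s.1 item, aStep normIp s.2 item)),
    PySem.List.foldl_prod_mk (f := fun d item => aStep normMac d item)
      (g := fun d item => aStep normIp d item)]
  simp only [aFold_eq_firstIndex]
  rfl
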